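-- pv_equiv track=rewrite | github.com/daniel-reich/turbo-robot | HaMCeHeJkaWvMg7LS_1.py | sun_loungers
-- ===== SOURCE A (Python) =====
-- def sun_loungers(beach):
--   ones = []
--   for i in range(len(beach)):
--     if beach[i] == '1':
--       ones.append(i)
--
--   if not ones:
--     return (len(beach)+1)//2
--
--   ans = sum((b-a-2)//2 for a,b in zip(ones, ones[1:]))
--   ans += ones[0]//2
--   ans += (len(beach) - ones[-1]-1)//2
--
--   return ans
-- ===== SOURCE B (Python) =====
-- def sun_loungers(beach):
--   # Run-length view: each maximal run of free cells bounded by `left`/`right`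
--   # existing loungers holds (run + 1 - left - right) // 2 new loungers.
--   total = 0
--   run = 0    # length of the current maximal run of free (non-'1') cells
--   left = 0   # 1 if that run has a lounger on its left, else 0
--   for c in beach:
--     if c == '1':
--       total += (run + 1 - left - 1) // 2
--       run, left = 0, 1
--     else:
--       run += 1
--   return total + (run + 1 - left) // 2
-- ===== Notes on version B (the rewrite author's own statement) =====
-- stated objective: simpler
-- what changed: B replaces A's position-based computation (collect the index list of occupied cells, zip it with its shift to sum (b-a-2)//2 gap terms, add two distinct edge formulas and a separate no-occupied-cell branch) by a run-length scan that never looks at positions: one pass maintains only the length of the current maximal run of free cells and a left-bounded flag, and every run - edge runs, inner runs and the whole beach alike - contributes through the single uniform capacity formula (run+1-left-right)//2, so the special cases disappear.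
import Mathlib
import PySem

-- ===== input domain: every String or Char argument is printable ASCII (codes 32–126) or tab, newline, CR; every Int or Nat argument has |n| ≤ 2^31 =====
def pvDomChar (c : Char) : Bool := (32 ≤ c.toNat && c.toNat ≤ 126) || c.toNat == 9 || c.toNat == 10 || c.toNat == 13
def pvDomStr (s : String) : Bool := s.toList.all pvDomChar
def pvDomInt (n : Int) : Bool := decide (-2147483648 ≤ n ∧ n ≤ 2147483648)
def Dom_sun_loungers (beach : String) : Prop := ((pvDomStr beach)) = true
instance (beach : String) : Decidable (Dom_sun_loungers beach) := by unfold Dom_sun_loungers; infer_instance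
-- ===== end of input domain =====

-- B replaces A's occupied-index list + zip-gap arithmetic by a single run-length pass with
-- one uniform per-run capacity formula (simpler: no positions, no special cases, O(1) space).

-- ===== PORT A =====
def sun_loungers (beach : String) : Int :=
  let n : Int := PySem.Str.len beach
  let ones : List Int := (PySem.List.pyRange 0 n 1).foldl
    (fun acc i => if PySem.Str.pyGet? beach i = some '1' then acc ++ [i] else acc) []
  if ones = [] then
    PySem.Int.floordiv (n + 1) 2
  else
    let ans : Int := (ones.zip (PySem.List.slice ones (some 1) none)).foldl
      (fun s p => s + PySem.Int.floordiv (p.2 - p.1 - 2) 2) 0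
    let ans := ans + PySem.Int.floordiv (PySem.List.pyGetD ones 0 0) 2
    let ans := ans + PySem.Int.floordiv (n - PySem.List.pyGetD ones (-1) 0 - 1) 2
    ans

-- ===== PORT B =====
-- one pass; state = (total, run, left): length of the current maximal run of free cells
-- and whether it is bounded on the left by a lounger (0/1, as in Source B)
def sun_loungers_alt (beach : String) : Int :=
  let st : Int × Int × Int := beach.toList.foldl
    (fun st c =>
      if c = '1' then
        (st.1 + PySem.Int.floordiv (st.2.1 + 1 - st.2.2 - 1) 2, 0, 1)
      else
        (st.1, st.2.1 + 1, st.2.2)) (0, 0, 0)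
  st.1 + PySem.Int.floordiv (st.2.1 + 1 - st.2.2) 2

-- ===== PRECONDITION & SPEC =====
def Spec_sun_loungers (beach : String) (out : Int) : Prop := out = sun_loungers_alt beach
instance (beach : String) (out : Int) : Decidable (Spec_sun_loungers beach out) := by unfold Spec_sun_loungers; infer_instance

-- ===== CLAIM (what is proved, stated in full; the proofs are below) =====
def Claim_equal_sun_loungers : Prop := ∀ (beach : String), Dom_sun_loungers beach → Spec_sun_loungers beach (sun_loungers beach)

-- ===== LEMMAS AND PROOFS =====

def pvB2i (b : Bool) : Int := if b then 1 else 0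

-- the indices (from start j) of the '1' characters
def pvOnes (j : Int) : List Char → List Int
  | [] => []
  | c :: cs => if c = '1' then j :: pvOnes (j + 1) cs else pvOnes (j + 1) cs

-- sum of floor-divided gaps along a chain of '1' indices, previous index a
def pvGapSum (a : Int) : List Int → Int
  | [] => 0
  | q :: qs => PySem.Int.floordiv (q - a - 2) 2 + pvGapSum q qs

def pvLast (a : Int) : List Int → Int
  | [] => a
  | b :: bs => pvLast b bs

-- A's value as a function of the beach length and the list of '1' indices
def pvA (n : Int) : List Int → Int
  | [] => PySem.Int.floordiv (n + 1) 2
  | o :: rest =>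
      PySem.Int.floordiv o 2 + pvGapSum o rest
        + PySem.Int.floordiv (n - pvLast o rest - 1) 2
-- same, in the context of a virtual '1' just before position 0
def pvBv (n : Int) : List Int → Int
  | [] => PySem.Int.floordiv n 2
  | o :: rest =>
      pvGapSum (-1) (o :: rest) + PySem.Int.floordiv (n - pvLast o rest - 1) 2

-- B's value, recursively: lb = left-bounded flag, r = current run of free cells
def pvV (lb : Bool) (r : Int) : List Char → Int
  | [] => PySem.Int.floordiv (r + 1 - pvB2i lb) 2
  | c :: cs =>
      if c = '1' then
        PySem.Int.floordiv (r + 1 - pvB2i lb - 1) 2 + pvV true 0 cs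
      else pvV lb (r + 1) cs

theorem pvOnes_cons_one (j : Int) (cs : List Char) :
    pvOnes j ('1' :: cs) = j :: pvOnes (j + 1) cs := by simp [pvOnes]

theorem pvOnes_cons_ne (j : Int) (c : Char) (cs : List Char) (h : c ≠ '1') :
    pvOnes j (c :: cs) = pvOnes (j + 1) cs := by simp [pvOnes, h]

theorem pvV_cons_one (lb : Bool) (r : Int) (cs : List Char) :
    pvV lb r ('1' :: cs)
      = PySem.Int.floordiv (r + 1 - pvB2i lb - 1) 2 + pvV true 0 cs := by simp [pvV]

theorem pvV_cons_ne (lb : Bool) (r : Int) (c : Char) (cs : List Char) (h : c ≠ '1') :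
    pvV lb r (c :: cs) = pvV lb (r + 1) cs := by simp [pvV, h]

theorem pvOnes_shift (l : List Char) : ∀ (j s : Int),
    pvOnes (j + s) l = (pvOnes j l).map (· + s) := by
  induction l with
  | nil => intro j s; simp [pvOnes]
  | cons c cs ih =>
      intro j s
      by_cases hc : c = '1' <;>
        simp [pvOnes, hc, ← ih, show j + s + 1 = j + 1 + s by ring]

theorem pvGapSum_shift (os : List Int) : ∀ (a s : Int),
    pvGapSum (a + s) (os.map (· + s)) = pvGapSum a os := by
  induction os with
  | nil => intro a s; simp [pvGapSum]
  | cons q qs ih =>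
      intro a s
      simp only [List.map_cons, pvGapSum, ih]
      congr 1
      congr 1
      ring

theorem pvLast_shift (os : List Int) : ∀ (a s : Int),
    pvLast (a + s) (os.map (· + s)) = pvLast a os + s := by
  induction os with
  | nil => intro a s; simp [pvLast]
  | cons q qs ih => intro a s; simp [pvLast, ih]

-- two small facts used by both bridge lemmas
theorem pv_gap_shift' (r : Int) (q : Int) (qs : List Int) :
    pvGapSum r ((q :: qs).map (· + (r + 1))) = pvGapSum (-1) (q :: qs) := by
  have := pvGapSum_shift (q :: qs) (-1) (r + 1)
  simpa [show (-1 : Int) + (r + 1) = r by ring] using this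

theorem pv_last_shift' (r : Int) (q : Int) (qs : List Int) :
    pvLast r ((q :: qs).map (· + (r + 1))) = pvLast q qs + (r + 1) := by
  simp only [List.map_cons, pvLast]
  exact pvLast_shift qs q (r + 1)

-- bridge: prepending a '1' at position r (after r free cells) to a shifted tail
theorem pv_bridge_A (r m : Int) (os : List Int) :
    pvA (r + 1 + m) (r :: (os.map (· + (r + 1))))
      = PySem.Int.floordiv r 2 + pvBv m os := by
  cases os with
  | nil =>
      simp only [List.map_nil, pvA, pvBv, pvGapSum, pvLast]
      rw [show r + 1 + m - r - 1 = m by ring]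
      ring
  | cons q qs =>
      simp only [pvA, pvBv]
      rw [pv_gap_shift' r q qs, pv_last_shift' r q qs,
          show r + 1 + m - (pvLast q qs + (r + 1)) - 1 = m - pvLast q qs - 1 by ring]
      ring

theorem pv_bridge_B (r m : Int) (os : List Int) :
    pvBv (r + 1 + m) (r :: (os.map (· + (r + 1))))
      = PySem.Int.floordiv (r - 1) 2 + pvBv m os := by
  cases os with
  | nil =>
      simp only [List.map_nil, pvBv, pvGapSum, pvLast]
      rw [show r - (-1) - 2 = r - 1 by ring, show r + 1 + m - r - 1 = m by ring]
      ring
  | cons q qs =>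
      simp only [pvBv]
      rw [show pvGapSum (-1) (r :: (q :: qs).map (· + (r + 1)))
            = PySem.Int.floordiv (r - (-1) - 2) 2
              + pvGapSum r ((q :: qs).map (· + (r + 1))) from rfl,
          pv_gap_shift' r q qs, pv_last_shift' r q qs,
          show r - (-1) - 2 = r - 1 by ring,
          show r + 1 + m - (pvLast q qs + (r + 1)) - 1 = m - pvLast q qs - 1 by ring]
      ring

-- core: B's recursion computes A's positional formula
theorem pv_core (l : List Char) : ∀ (r : Int),
    (pvV false r l = pvA (r + l.length) (pvOnes r l))
    ∧ (pvV true r l = pvBv (r + l.length) (pvOnes r l)) := by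
  induction l with
  | nil =>
      intro r
      constructor <;> simp [pvV, pvA, pvBv, pvOnes, pvB2i]
  | cons c cs ih =>
      intro r
      have hn : (r + ((cs.length + 1 : Nat) : Int)) = r + 1 + (cs.length : Int) := by
        push_cast; ring
      by_cases hc : c = '1'
      · subst hc
        have hones : pvOnes (r + 1) cs = (pvOnes 0 cs).map (· + (r + 1)) := by
          have := pvOnes_shift cs 0 (r + 1)
          simpa using this
        have ihb := (ih 0).2
        simp only [Int.zero_add] at ihb
        constructor
        · rw [pvV_cons_one, pvOnes_cons_one, List.length_cons, hn, hones,
              pv_bridge_A r (cs.length : Int) (pvOnes 0 cs), ihb,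
              show r + 1 - pvB2i false - 1 = r by simp [pvB2i]]
        · rw [pvV_cons_one, pvOnes_cons_one, List.length_cons, hn, hones,
              pv_bridge_B r (cs.length : Int) (pvOnes 0 cs), ihb,
              show r + 1 - pvB2i true - 1 = r - 1 by simp [pvB2i]]
      · constructor
        · rw [pvV_cons_ne _ _ _ _ hc, pvOnes_cons_ne _ _ _ hc, List.length_cons, hn,
              show r + 1 + (cs.length : Int) = (r + 1) + (cs.length : Int) by ring]
          exact (ih (r + 1)).1
        · rw [pvV_cons_ne _ _ _ _ hc, pvOnes_cons_ne _ _ _ hc, List.length_cons, hn,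
              show r + 1 + (cs.length : Int) = (r + 1) + (cs.length : Int) by ring]
          exact (ih (r + 1)).2

-- A-side: the collected index list is pvOnes 0
theorem pv_enum_ones (l : List Char) : ∀ (j : Int),
    ((PySem.List.enumerate l j).filter (fun ic => decide (ic.2 = '1'))).map (fun ic => ic.1)
      = pvOnes j l := by
  induction l with
  | nil => intro j; simp [PySem.List.enumerate_nil, pvOnes]
  | cons c cs ih =>
      intro j
      by_cases hc : c = '1' <;>
        simp [PySem.List.enumerate_cons, pvOnes, hc, ih (j + 1)]

theorem pv_ones_filter (beach : String) :
    (PySem.List.pyRange 0 (beach.toList.length : Int) 1).filter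
        (fun i => decide (PySem.Str.pyGet? beach i = some '1'))
      = pvOnes 0 beach.toList := by
  rw [← pv_enum_ones beach.toList 0]
  rw [PySem.List.enumerate_eq_map_pyRange beach.toList 'x', List.filter_map, List.map_map]
  rw [PySem.List.len_eq beach.toList]
  have hcomp : ((fun ic : Int × Char => ic.1) ∘ fun j => (j, PySem.List.pyGetD beach.toList j 'x'))
      = fun j => j := rfl
  rw [hcomp, List.map_id']
  refine List.filter_congr ?_
  intro j hj
  rw [PySem.List.mem_pyRange_one] at hj
  obtain ⟨h0, h1⟩ := hj
  have hjn : j = (j.toNat : Int) := (Int.toNat_of_nonneg h0).symm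
  have hlt : j.toNat < beach.toList.length := by omega
  rw [hjn, PySem.Str.pyGet?_natCast, Function.comp, PySem.List.pyGetD_natCast]
  simp [List.getElem?_eq_getElem hlt, List.getD_eq_getElem?_getD]

-- A's zip-gap fold is pvGapSum
theorem pv_zipgap (ps : List Int) : ∀ (p t : Int),
    ((p :: ps).zip ps).foldl (fun s q => s + PySem.Int.floordiv (q.2 - q.1 - 2) 2) t
      = t + pvGapSum p ps := by
  induction ps with
  | nil => intro p t; simp [pvGapSum]
  | cons q qs ih =>
      intro p t
      simp only [List.zip_cons_cons, List.foldl_cons]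
      rw [ih q]
      simp [pvGapSum]; ring

theorem pv_getLast_pvLast (rest : List Int) : ∀ (o : Int) (h : (o :: rest) ≠ []),
    (o :: rest).getLast h = pvLast o rest := by
  induction rest with
  | nil => intro o h; simp [pvLast]
  | cons b bs ih =>
      intro o h
      rw [List.getLast_cons (List.cons_ne_nil b bs)]
      simp [pvLast, ih b]

-- A's port equals the positional formula
theorem pv_A_eq (beach : String) :
    sun_loungers beach = pvA (beach.toList.length : Int) (pvOnes 0 beach.toList) := by
  unfold sun_loungers
  simp only [PySem.Str.len_eq]
  rw [PySem.List.foldl_append_ite_eq_filter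
        (fun i => PySem.Str.pyGet? beach i = some '1')]
  simp only [List.nil_append]
  rw [pv_ones_filter beach]
  cases hc : pvOnes 0 beach.toList with
  | nil => simp [pvA]
  | cons p ps =>
      have hne : (p :: ps) ≠ ([] : List Int) := List.cons_ne_nil p ps
      simp only [if_neg hne]
      rw [PySem.List.slice_from_one]
      simp only [List.tail_cons]
      rw [pv_zipgap ps p 0]
      rw [PySem.List.pyGetD_zero_cons, PySem.List.pyGetD_neg_one (p :: ps) 0 hne]
      rw [pv_getLast_pvLast ps p hne]
      show 0 + pvGapSum p ps + PySem.Int.floordiv p 2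
          + PySem.Int.floordiv ((beach.toList.length : Int) - pvLast p ps - 1) 2 = _
      simp only [pvA]
      ring

-- B's port fold equals pvV
theorem pv_B_fold (l : List Char) : ∀ (t r b : Int) (lb : Bool), b = pvB2i lb →
    (l.foldl
        (fun st c =>
          if c = '1' then
            (st.1 + PySem.Int.floordiv (st.2.1 + 1 - st.2.2 - 1) 2, 0, 1)
          else
            (st.1, st.2.1 + 1, st.2.2)) ((t, r, b) : Int × Int × Int)).1
      + PySem.Int.floordiv
          ((l.foldl
              (fun st c =>
                if c = '1' then
                  (st.1 + PySem.Int.floordiv (st.2.1 + 1 - st.2.2 - 1) 2, 0, 1)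
                else
                  (st.1, st.2.1 + 1, st.2.2)) ((t, r, b) : Int × Int × Int)).2.1 + 1
            - (l.foldl
                (fun st c =>
                  if c = '1' then
                    (st.1 + PySem.Int.floordiv (st.2.1 + 1 - st.2.2 - 1) 2, 0, 1)
                  else
                    (st.1, st.2.1 + 1, st.2.2)) ((t, r, b) : Int × Int × Int)).2.2) 2
      = t + pvV lb r l := by
  induction l with
  | nil =>
      intro t r b lb hb
      subst hb
      simp [pvV]
  | cons c cs ih =>
      intro t r b lb hb
      by_cases hc : c = '1'
      · subst hc
        simp only [List.foldl_cons, reduceIte]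
        rw [ih (t + PySem.Int.floordiv (r + 1 - b - 1) 2) 0 1 true rfl,
            pvV_cons_one]
        subst hb
        ring
      · simp only [List.foldl_cons, if_neg hc]
        rw [pvV_cons_ne _ _ _ _ hc]
        exact ih t (r + 1) b lb hb

theorem pv_main (beach : String) : sun_loungers beach = sun_loungers_alt beach := by
  rw [pv_A_eq beach]
  simp only [sun_loungers_alt]
  rw [pv_B_fold beach.toList 0 0 0 false rfl]
  have h := (pv_core beach.toList 0).1
  simp only [Int.zero_add] at h
  rw [← h]
  ring_nf

-- ===== VERDICT (by name: the statement is the Claim_ definition above) =====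
theorem sun_loungers_spec : Claim_equal_sun_loungers := by
  intro beach _
  unfold Spec_sun_loungers
  exact pv_main beach
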